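-- pv_equiv track=rewrite | github.com/Oli51467/starfish | backend/services/graphrag_service.py | _merge_provider_labels
-- ===== SOURCE A (Python) =====
-- def _merge_provider_labels(providers: set[str]) -> str:
--     normalized: set[str] = set()
--     for item in providers:
--         text = str(item).strip()
--         if not text:
--             continue
--         parts = [part.strip() for part in text.split("+") if part.strip()]
--         normalized.update(parts or [text])
--     if "semantic_scholar" in normalized:
--         return "semantic_scholar"
--     if "openalex" in normalized:
--         return "openalex"
--     if "crossref" in normalized:
--         return "crossref"
--     if "arxiv" in normalized:
--         return "arxiv"
--     return "mock"
-- ===== SOURCE B (Python) =====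
-- def _merge_provider_labels(providers: set[str]) -> str:
--     # Rank-based single reduction: minimum priority rank over all stripped parts,
--     # instead of building a normalized set and probing it label by label.
--     labels = ["semantic_scholar", "openalex", "crossref", "arxiv", "mock"]
--     rank = {"semantic_scholar": 0, "openalex": 1, "crossref": 2, "arxiv": 3}
--     best = 4
--     for item in providers:
--         for part in str(item).strip().split("+"):
--             best = min(best, rank.get(part.strip(), 4))
--     return labels[best]
-- ===== Notes on version B (the rewrite author's own statement) =====
-- stated objective: simpler
-- what changed: Replaces A's two-phase build-a-normalized-set-then-probe-it-in-priority-order logic with a single min-rank reduction: each stripped part is mapped to a priority rank via a dict and folded with min, and the answer is the label at the best rank.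
import Mathlib
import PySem

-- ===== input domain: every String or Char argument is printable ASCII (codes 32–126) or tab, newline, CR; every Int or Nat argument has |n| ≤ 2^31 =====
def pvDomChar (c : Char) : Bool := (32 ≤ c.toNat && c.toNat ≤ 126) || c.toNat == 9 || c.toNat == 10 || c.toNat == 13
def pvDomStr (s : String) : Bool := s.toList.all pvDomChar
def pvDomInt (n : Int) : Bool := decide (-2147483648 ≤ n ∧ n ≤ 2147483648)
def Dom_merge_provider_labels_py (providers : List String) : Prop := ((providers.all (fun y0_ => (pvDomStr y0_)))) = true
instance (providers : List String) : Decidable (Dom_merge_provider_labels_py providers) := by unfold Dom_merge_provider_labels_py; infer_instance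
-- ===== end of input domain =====

-- B replaces A's normalized set and four sequential membership probes by a single
-- min-rank reduction over the stripped parts (objective: simpler).

-- shared primitive wrapper: text.split("+"); split? is always `some` since the separator "+" is nonempty
def splitPlus (s : String) : List String := (PySem.Str.split? s "+").getD []

-- ===== PORT A =====
def merge_provider_labels_py (providers : List String) : String :=
  let normalized : PySem.Set String :=
    providers.foldl (fun normalized item =>
      let text := PySem.Str.strip item
      if text = "" then normalized
      else
        let parts := ((splitPlus text).map PySem.Str.strip).filter (fun p => p ≠ "")
        PySem.Set.update normalized (if parts = [] then [text] else parts))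
      PySem.Set.empty
  if PySem.Set.contains normalized "semantic_scholar" then "semantic_scholar"
  else if PySem.Set.contains normalized "openalex" then "openalex"
  else if PySem.Set.contains normalized "crossref" then "crossref"
  else if PySem.Set.contains normalized "arxiv" then "arxiv"
  else "mock"

-- ===== PORT B =====
def pvRank : PySem.Dict String Nat :=
  PySem.Dict.ofList [("semantic_scholar", 0), ("openalex", 1), ("crossref", 2), ("arxiv", 3)]

def merge_provider_labels_py_alt (providers : List String) : String :=
  let labels := ["semantic_scholar", "openalex", "crossref", "arxiv", "mock"]
  let best : Nat :=
    providers.foldl (fun best item =>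
      (splitPlus (PySem.Str.strip item)).foldl
        (fun b part => min b (PySem.Dict.getD pvRank (PySem.Str.strip part) 4)) best)
      4
  -- labels[best]: best starts at 4 and only decreases, so it is a valid index and the getD default is never taken
  labels.getD best "mock"

-- ===== PRECONDITION & SPEC =====
def Spec_merge_provider_labels_py (providers : List String) (out : String) : Prop := out = merge_provider_labels_py_alt providers
instance (providers : List String) (out : String) : Decidable (Spec_merge_provider_labels_py providers out) := by unfold Spec_merge_provider_labels_py; infer_instance

-- ===== CLAIM (what is proved, stated in full; the proofs are below) =====
def Claim_equal_merge_provider_labels_py : Prop := ∀ (providers : List String), Dom_merge_provider_labels_py providers → Spec_merge_provider_labels_py providers (merge_provider_labels_py providers)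

-- ===== LEMMAS AND PROOFS =====

-- rank of a single string: 0..3 for the four labels, 4 otherwise (= pvRank.getD · 4)
def rstr (p : String) : Nat :=
  if p = "semantic_scholar" then 0
  else if p = "openalex" then 1
  else if p = "crossref" then 2
  else if p = "arxiv" then 3
  else 4

-- named copies of the two loop bodies (definitionally equal to the lambdas in the ports)
def stepA (normalized : PySem.Set String) (item : String) : PySem.Set String :=
  if PySem.Str.strip item = "" then normalized
  else
    PySem.Set.update normalized
      (if ((splitPlus (PySem.Str.strip item)).map PySem.Str.strip).filter (fun p => p ≠ "") = []
       then [PySem.Str.strip item]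
       else ((splitPlus (PySem.Str.strip item)).map PySem.Str.strip).filter (fun p => p ≠ ""))

def stepB (b : Nat) (item : String) : Nat :=
  (splitPlus (PySem.Str.strip item)).foldl
    (fun b part => min b (rstr (PySem.Str.strip part))) b

def chainOf (s : PySem.Set String) : String :=
  if PySem.Set.contains s "semantic_scholar" then "semantic_scholar"
  else if PySem.Set.contains s "openalex" then "openalex"
  else if PySem.Set.contains s "crossref" then "crossref"
  else if PySem.Set.contains s "arxiv" then "arxiv"
  else "mock"

lemma string_beq_decide (a b : String) : (a == b) = decide (b = a) := by
  by_cases h : a = b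
  · subst h; simp
  · simp [h, Ne.symm h]

lemma getD_pvRank (p : String) : PySem.Dict.getD pvRank p 4 = rstr p := by
  unfold rstr pvRank
  simp only [PySem.Dict.getD, PySem.Dict.get?, PySem.Dict.ofList, PySem.Dict.empty,
    PySem.Dict.update, PySem.Dict.insert, PySem.Dict.contains,]
  by_cases h1 : p = "semantic_scholar" <;> by_cases h2 : p = "openalex" <;>
    by_cases h3 : p = "crossref" <;> by_cases h4 : p = "arxiv" <;>
    simp_all [string_beq_decide]

lemma portA_eq (providers : List String) :
    merge_provider_labels_py providers = chainOf (providers.foldl stepA PySem.Set.empty) := rfl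

lemma portB_eq (providers : List String) :
    merge_provider_labels_py_alt providers
      = ["semantic_scholar", "openalex", "crossref", "arxiv", "mock"].getD
          (providers.foldl stepB 4) "mock" := by
  unfold merge_provider_labels_py_alt stepB
  simp only [getD_pvRank]

-- fold-min characterisation
lemma foldl_min_le_iff (f : String → Nat) (l : List String) (a k : Nat) :
    l.foldl (fun b p => min b (f p)) a ≤ k ↔ a ≤ k ∨ ∃ p ∈ l, f p ≤ k := by
  induction l generalizing a with
  | nil => simp
  | cons x xs ih =>
    simp only [List.foldl_cons, ih, min_le_iff, List.mem_cons]
    constructor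
    · rintro (h | ⟨p, hp, hpk⟩)
      · rcases h with h | h
        · exact Or.inl h
        · exact Or.inr ⟨x, Or.inl rfl, h⟩
      · exact Or.inr ⟨p, Or.inr hp, hpk⟩
    · rintro (h | ⟨p, rfl | hp, hpk⟩)
      · exact Or.inl (Or.inl h)
      · exact Or.inl (Or.inr hpk)
      · exact Or.inr ⟨p, hp, hpk⟩

-- rank of a set of strings (as a min-fold)
def rkSet (s : List String) : Nat := s.foldl (fun b p => min b (rstr p)) 4

lemma rkSet_le_iff (s : List String) (k : Nat) :
    rkSet s ≤ k ↔ 4 ≤ k ∨ ∃ p ∈ s, rstr p ≤ k := foldl_min_le_iff _ s 4 k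

lemma rkSet_le_four (s : List String) : rkSet s ≤ 4 := (rkSet_le_iff s 4).2 (Or.inl le_rfl)

lemma rstr_le_three (p : String) (h : rstr p ≤ 3) :
    p = "semantic_scholar" ∨ p = "openalex" ∨ p = "crossref" ∨ p = "arxiv" := by
  unfold rstr at h
  split_ifs at h with h1 h2 h3 h4
  · exact Or.inl h1
  · exact Or.inr (Or.inl h2)
  · exact Or.inr (Or.inr (Or.inl h3))
  · exact Or.inr (Or.inr (Or.inr h4))
  · omega

-- a label always survives A's strip/split/filter normalisation
lemma parts_of_label (L : String)
    (hL : L = "semantic_scholar" ∨ L = "openalex" ∨ L = "crossref" ∨ L = "arxiv") :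
    ((splitPlus L).map PySem.Str.strip).filter (fun p => p ≠ "") ≠ [] := by
  rcases hL with rfl | rfl | rfl | rfl <;> decide

lemma rstr_empty : rstr "" = 4 := by decide

-- per-item step equality, via the ≤-characterisation
lemma step_le_iff (acc : PySem.Set String) (item : String) (k : Nat) :
    rkSet (stepA acc item) ≤ k ↔ stepB (rkSet acc) item ≤ k := by
  unfold stepA stepB
  rw [foldl_min_le_iff]
  by_cases hk : 4 ≤ k
  · constructor
    · intro _
      exact Or.inl (le_trans (rkSet_le_four acc) hk)
    · intro _
      exact le_trans (rkSet_le_four _) hk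
  · -- k ≤ 3
    have hk3 : k ≤ 3 := by omega
    by_cases ht : PySem.Str.strip item = ""
    · rw [if_pos ht, ht]
      have hsplit : splitPlus "" = [""] := by decide
      rw [hsplit]
      constructor
      · intro h; exact Or.inl h
      · rintro (h | ⟨p, hp, hpk⟩)
        · exact h
        · simp only [List.mem_singleton] at hp
          subst hp
          have hse : PySem.Str.strip "" = "" := by decide
          rw [hse, rstr_empty] at hpk; omega
    · rw [if_neg ht]
      constructor
      · intro h
        rcases (rkSet_le_iff _ k).1 h with h4 | ⟨p, hp, hpk⟩
        · omega
        · rcases (PySem.Set.mem_update _ _ _).1 hp with hp' | hp'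
          · exact Or.inl ((rkSet_le_iff acc k).2 (Or.inr ⟨p, hp', hpk⟩))
          · split_ifs at hp' with hparts
            · simp only [List.mem_singleton] at hp'
              subst hp'
              exact absurd hparts (parts_of_label _ (rstr_le_three _ (le_trans hpk hk3)))
            · rcases List.mem_map.1 (List.mem_of_mem_filter hp') with ⟨q, hq, rfl⟩
              exact Or.inr ⟨q, hq, hpk⟩
      · rintro (h | ⟨q, hq, hqk⟩)
        · rcases (rkSet_le_iff acc k).1 h with h4 | ⟨p, hp, hpk⟩
          · omega
          · exact (rkSet_le_iff _ k).2
              (Or.inr ⟨p, (PySem.Set.mem_update _ _ _).2 (Or.inl hp), hpk⟩)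
        · have hlab := rstr_le_three _ (le_trans hqk hk3)
          have hne : PySem.Str.strip q ≠ "" := by
            rcases hlab with h | h | h | h <;> rw [h] <;> decide
          have hmem : PySem.Str.strip q ∈
              ((splitPlus (PySem.Str.strip item)).map PySem.Str.strip).filter (fun p => p ≠ "") :=
            List.mem_filter.2 ⟨List.mem_map.2 ⟨q, hq, rfl⟩, by simpa using hne⟩
          have hmem' : PySem.Str.strip q ∈
              (if ((splitPlus (PySem.Str.strip item)).map PySem.Str.strip).filter (fun p => p ≠ "") = []
               then [PySem.Str.strip item]
               else ((splitPlus (PySem.Str.strip item)).map PySem.Str.strip).filter (fun p => p ≠ "")) := by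
            split_ifs with hparts
            · rw [hparts] at hmem; simp at hmem
            · exact hmem
          exact (rkSet_le_iff _ k).2
            (Or.inr ⟨PySem.Str.strip q, (PySem.Set.mem_update _ _ _).2 (Or.inr hmem'), hqk⟩)

lemma main_fold (l : List String) (acc : PySem.Set String) :
    rkSet (l.foldl stepA acc) = l.foldl stepB (rkSet acc) := by
  induction l generalizing acc with
  | nil => simp only [List.foldl_nil]
  | cons x xs ih =>
    have hinit : rkSet (stepA acc x) = stepB (rkSet acc) x :=
      le_antisymm ((step_le_iff acc x (stepB (rkSet acc) x)).2 le_rfl)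
        ((step_le_iff acc x (rkSet (stepA acc x))).1 le_rfl)
    simp only [List.foldl_cons]
    rw [ih (stepA acc x), hinit]

lemma rstr_ss : rstr "semantic_scholar" = 0 := by decide
lemma rstr_oa : rstr "openalex" = 1 := by decide
lemma rstr_cr : rstr "crossref" = 2 := by decide
lemma rstr_ax : rstr "arxiv" = 3 := by decide

lemma final_chain (s : PySem.Set String) :
    chainOf s = ["semantic_scholar", "openalex", "crossref", "arxiv", "mock"].getD (rkSet s) "mock" := by
  unfold chainOf
  have hb (p : String) (hp : p ∈ s) (k : Nat) (h : rstr p ≤ k) : rkSet s ≤ k :=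
    (rkSet_le_iff s k).2 (Or.inr ⟨p, hp, h⟩)
  have hnot (k : Nat) (hk : k ≤ 3)
      (h1 : "semantic_scholar" ∉ s) (h2 : 1 ≤ k → "openalex" ∉ s)
      (h3 : 2 ≤ k → "crossref" ∉ s) (h4 : 3 ≤ k → "arxiv" ∉ s) : ¬ rkSet s ≤ k := by
    intro h
    rcases (rkSet_le_iff s k).1 h with h4' | ⟨p, hp, hpk⟩
    · omega
    · rcases rstr_le_three p (le_trans hpk hk) with rfl | rfl | rfl | rfl
      · exact h1 hp
      · rw [rstr_oa] at hpk; exact h2 hpk hp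
      · rw [rstr_cr] at hpk; exact h3 hpk hp
      · rw [rstr_ax] at hpk; exact h4 hpk hp
  by_cases h1 : "semantic_scholar" ∈ s
  · have : rkSet s = 0 := Nat.le_zero.1 (hb _ h1 0 (by rw [rstr_ss]))
    simp [h1, this]
  · by_cases h2 : "openalex" ∈ s
    · have hle : rkSet s ≤ 1 := hb _ h2 1 (by rw [rstr_oa])
      have hgt := hnot 0 (by omega) h1 (by omega) (by omega) (by omega)
      have : rkSet s = 1 := by omega
      simp [h1, h2, this]
    · by_cases h3 : "crossref" ∈ s
      · have hle : rkSet s ≤ 2 := hb _ h3 2 (by rw [rstr_cr])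
        have hgt := hnot 1 (by omega) h1 (fun _ => h2) (by omega) (by omega)
        have : rkSet s = 2 := by omega
        simp [h1, h2, h3, this]
      · by_cases h4 : "arxiv" ∈ s
        · have hle : rkSet s ≤ 3 := hb _ h4 3 (by rw [rstr_ax])
          have hgt := hnot 2 (by omega) h1 (fun _ => h2) (fun _ => h3) (by omega)
          have : rkSet s = 3 := by omega
          simp [h1, h2, h3, h4, this]
        · have hgt := hnot 3 le_rfl h1 (fun _ => h2) (fun _ => h3) (fun _ => h4)
          have hle := rkSet_le_four s
          have : rkSet s = 4 := by omega
          simp [h1, h2, h3, h4, this]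

-- ===== VERDICT (by name: the statement is the Claim_ definition above) =====
theorem merge_provider_labels_py_spec : Claim_equal_merge_provider_labels_py := by
  intro providers _
  unfold Spec_merge_provider_labels_py
  rw [portA_eq, portB_eq, final_chain, main_fold]
  rfl
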